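-- pv_equiv track=rewrite | github.com/yuweichuan/PTMSeeker | graph.py | find_paths_to_endpoint
-- ===== SOURCE A (Python) =====
-- def find_paths_to_endpoint(graph, start, endpoint):
--     paths = []
--     visited = set()  # Set to keep track of visited nodes
--
--     def dfs(current_node, path, current_weight):
--         visited.add(current_node)
--         path.append(current_node)
--
--         if current_node == endpoint:
--             paths.append((path[:], current_weight))  # Append a copy of the current path and its weight
--
--         for neighbor, weight in graph[current_node]:
--             if neighbor not in visited:
--                 dfs(neighbor, path, current_weight + weight)
--
--         visited.remove(current_node)
--         path.pop()
--
--     dfs(start, [], '')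
--     return paths
-- ===== SOURCE B (Python) =====
-- def find_paths_to_endpoint(graph, start, endpoint):
--     paths = []
--     stack = [(start, (), '')]
--     while stack:
--         node, path, weight = stack.pop()
--         path = path + (node,)
--         if node == endpoint:
--             paths.append((list(path), weight))
--         for neighbor, w in reversed(graph[node]):
--             if neighbor not in path:
--                 stack.append((neighbor, path, weight + w))
--     return paths
-- ===== Notes on version B (the rewrite author's own statement) =====
-- stated objective: alternative
-- what changed: A's recursive DFS with a shared mutable visited set, path list and nested closure is replaced by an iterative DFS over an explicit stack of (node, path, weight) frames with persistent tuple paths, pushing neighbours in reverse so the output order matches A's preorder.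
-- outside the precondition, e.g. on find_paths_to_endpoint({'a': [], 'x': [('y', '1')]}, 'a', 'a'): A returns [(['a'], '')], B returns [(['a'], '')]
import Mathlib
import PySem

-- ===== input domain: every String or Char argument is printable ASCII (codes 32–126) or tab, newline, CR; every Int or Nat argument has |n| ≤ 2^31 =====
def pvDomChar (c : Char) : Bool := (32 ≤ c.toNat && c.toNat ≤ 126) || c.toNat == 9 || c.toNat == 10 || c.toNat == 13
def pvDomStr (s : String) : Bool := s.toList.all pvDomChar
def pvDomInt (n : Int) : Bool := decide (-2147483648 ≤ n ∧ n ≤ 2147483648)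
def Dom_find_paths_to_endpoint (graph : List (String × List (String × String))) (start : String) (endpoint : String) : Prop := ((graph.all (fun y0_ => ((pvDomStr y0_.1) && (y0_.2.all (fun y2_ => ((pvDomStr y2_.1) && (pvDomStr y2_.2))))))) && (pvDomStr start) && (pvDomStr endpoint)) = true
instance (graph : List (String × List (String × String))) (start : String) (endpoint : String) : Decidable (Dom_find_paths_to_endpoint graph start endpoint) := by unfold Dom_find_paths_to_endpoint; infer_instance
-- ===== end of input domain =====

-- B replaces A's recursive DFS (shared mutable visited set / path list) by an iterative DFS over an
-- explicit stack of (node, path, weight) frames with persistent path tuples; same return value.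

-- ===== PORT A =====

-- graph[current_node]: Python dict lookup (first match in the association list); none = KeyError
def pvLookup : List (String × List (String × String)) → String → Option (List (String × String))
  | [], _ => none
  | e :: rest, k => if e.1 = k then some e.2 else pvLookup rest k

-- A's recursive dfs; the nested `for` loop is `loopA`.  `visited` always equals the set of nodes on
-- `path`, so the `neighbor not in visited` test is ported as membership in the current path.
-- `fuel` is only a totality guard (recursion depth is bounded on Pre_ inputs); none = fuel ran out
-- or a KeyError (missing key), both excluded by Pre_.
mutual
def dfsA (graph : List (String × List (String × String))) (endpoint : String) :
    Nat → String → List String → String → List (List String × String) → Option (List (List String × String))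
  | 0, _, _, _, _ => none
  | f+1, node, path, w, paths =>
    match pvLookup graph node with
    | none => none
    | some nbrs =>
      loopA graph endpoint f nbrs (path ++ [node]) w
        (if node = endpoint then paths ++ [(path ++ [node], w)] else paths)
  termination_by f _ _ _ _ => (f, 0)

def loopA (graph : List (String × List (String × String))) (endpoint : String) :
    Nat → List (String × String) → List String → String → List (List String × String) → Option (List (List String × String))
  | _, [], _, _, paths => some paths
  | f, nb :: rest, path', w, paths =>
    if nb.1 ∈ path' then loopA graph endpoint f rest path' w paths
    else match dfsA graph endpoint f nb.1 path' (w ++ nb.2) paths with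
      | none => none
      | some paths2 => loopA graph endpoint f rest path' w paths2
  termination_by f nbrs _ _ _ => (f, nbrs.length + 1)
end

def find_paths_to_endpoint (graph : List (String × List (String × String))) (start : String) (endpoint : String) : List (List String × String) :=
  (dfsA graph endpoint (graph.length + 2) start [] "" []).getD []

-- ===== PORT B =====

-- maximum adjacency-list length; only used to compute a sufficient fuel bound for the loop guard
def pvMaxDeg (graph : List (String × List (String × String))) : Nat :=
  graph.foldl (fun a e => max a e.2.length) 0

-- B's while loop: pop a frame (stack head = Python list end), record if endpoint, push the
-- reversed filtered neighbours (the fold over nbrs.reverse conses each pushed frame on top).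
-- `fuel` counts loop iterations, a totality guard only; none = fuel ran out or KeyError.
def runB (graph : List (String × List (String × String))) (endpoint : String) :
    Nat → List (String × List String × String) → List (List String × String) → Option (List (List String × String))
  | _, [], paths => some paths
  | 0, _ :: _, _ => none
  | g+1, (node, path, w) :: rest, paths =>
    match pvLookup graph node with
    | none => none
    | some nbrs =>
      runB graph endpoint g
        (nbrs.reverse.foldl
          (fun st p => if p.1 ∈ path ++ [node] then st else (p.1, path ++ [node], w ++ p.2) :: st) rest)
        (if node = endpoint then paths ++ [(path ++ [node], w)] else paths)

def find_paths_to_endpoint_alt (graph : List (String × List (String × String))) (start : String) (endpoint : String) : List (List String × String) :=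
  (runB graph endpoint ((pvMaxDeg graph + 1) ^ (graph.length + 2) + 1) [(start, [], "")] []).getD []

-- ===== PRECONDITION & SPEC =====

-- A raises KeyError when graph[node] misses for a reached node.  Pre_ requires start and every
-- listed neighbour to be a key; this also excludes some inputs A returns on (a missing neighbour
-- that is never reached from start), where both programs return the same value.
def Pre_find_paths_to_endpoint (graph : List (String × List (String × String))) (start : String) (endpoint : String) : Prop :=
  start ∈ graph.map Prod.fst ∧ ∀ e ∈ graph, ∀ nb ∈ e.2, nb.1 ∈ graph.map Prod.fst

instance (graph : List (String × List (String × String))) (start : String) (endpoint : String) : Decidable (Pre_find_paths_to_endpoint graph start endpoint) := by unfold Pre_find_paths_to_endpoint; infer_instance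

def pvWitness_find_paths_to_endpoint : (List (String × List (String × String))) × String × String :=
  ([("a", [("b", "1")]), ("b", [])], "a", "b")

def Spec_find_paths_to_endpoint (graph : List (String × List (String × String))) (start : String) (endpoint : String) (out : List (List String × String)) : Prop := out = find_paths_to_endpoint_alt graph start endpoint
instance (graph : List (String × List (String × String))) (start : String) (endpoint : String) (out : List (List String × String)) : Decidable (Spec_find_paths_to_endpoint graph start endpoint out) := by unfold Spec_find_paths_to_endpoint; infer_instance

-- ===== CLAIM (what is proved, stated in full; the proofs are below) =====
def Claim_equal_find_paths_to_endpoint : Prop := ∀ (graph : List (String × List (String × String))) (start : String) (endpoint : String), Dom_find_paths_to_endpoint graph start endpoint → Pre_find_paths_to_endpoint graph start endpoint → Spec_find_paths_to_endpoint graph start endpoint (find_paths_to_endpoint graph start endpoint)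

-- ===== LEMMAS AND PROOFS =====

lemma pvLookup_mem (graph : List (String × List (String × String))) (k : String)
    (v : List (String × String)) (h : pvLookup graph k = some v) : (k, v) ∈ graph := by
  induction graph with
  | nil => simp [pvLookup] at h
  | cons e rest ih =>
    obtain ⟨a, b⟩ := e
    by_cases he : a = k
    · simp only [pvLookup, if_pos he] at h
      injection h with h
      subst he; subst h
      exact List.mem_cons_self ..
    · simp only [pvLookup, if_neg he] at h
      exact List.mem_cons_of_mem _ (ih h)

lemma pvLookup_exists (graph : List (String × List (String × String))) (k : String)
    (h : k ∈ graph.map Prod.fst) : ∃ v, pvLookup graph k = some v := by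
  induction graph with
  | nil => simp at h
  | cons e rest ih =>
    by_cases he : e.1 = k
    · exact ⟨e.2, by simp [pvLookup, he]⟩
    · rw [List.map_cons] at h
      rcases List.mem_cons.mp h with h | h
      · exact absurd h.symm he
      · obtain ⟨v, hv⟩ := ih h
        exact ⟨v, by simp only [pvLookup, if_neg he]; exact hv⟩

lemma foldl_max_init (graph : List (String × List (String × String))) (a : Nat) :
    a ≤ graph.foldl (fun a e => max a e.2.length) a := by
  induction graph generalizing a with
  | nil => simp
  | cons e rest ih =>
    calc a ≤ max a e.2.length := Nat.le_max_left _ _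
    _ ≤ rest.foldl (fun a e => max a e.2.length) (max a e.2.length) := ih _

lemma deg_le_maxDeg_aux (graph : List (String × List (String × String))) (a : Nat)
    (k : String) (v : List (String × String)) (h : (k, v) ∈ graph) :
    v.length ≤ graph.foldl (fun a e => max a e.2.length) a := by
  induction graph generalizing a with
  | nil => simp at h
  | cons e rest ih =>
    rcases List.mem_cons.mp h with h | h
    · subst h
      simp only [List.foldl_cons]
      calc v.length ≤ max a v.length := Nat.le_max_right _ _
      _ ≤ rest.foldl (fun a e => max a e.2.length) (max a v.length) := foldl_max_init _ _
    · simp only [List.foldl_cons]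
      exact ih _ h

lemma deg_le_maxDeg (graph : List (String × List (String × String)))
    (k : String) (v : List (String × String)) (h : (k, v) ∈ graph) :
    v.length ≤ pvMaxDeg graph := deg_le_maxDeg_aux graph 0 k v h

-- the frames B pushes while expanding `nbrs` at path `path'` with accumulated weight `w`
def framesOf (nbrs : List (String × String)) (path' : List String) (w : String) :
    List (String × List String × String) :=
  (nbrs.filter (fun p => p.1 ∉ path')).map (fun p => (p.1, path', w ++ p.2))

lemma framesOf_cons_mem (nb : String × String) (t : List (String × String))
    (path' : List String) (w : String) (h : nb.1 ∈ path') :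
    framesOf (nb :: t) path' w = framesOf t path' w := by
  simp [framesOf, h]

lemma framesOf_cons_not (nb : String × String) (t : List (String × String))
    (path' : List String) (w : String) (h : nb.1 ∉ path') :
    framesOf (nb :: t) path' w = (nb.1, path', w ++ nb.2) :: framesOf t path' w := by
  simp [framesOf, h]

lemma push_eq (nbrs : List (String × String)) (path' : List String) (w : String)
    (rest : List (String × List String × String)) :
    nbrs.reverse.foldl (fun st p => if p.1 ∈ path' then st else (p.1, path', w ++ p.2) :: st) rest
      = framesOf nbrs path' w ++ rest := by
  rw [List.foldl_reverse]
  induction nbrs with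
  | nil => simp [framesOf]
  | cons nb t ih =>
    by_cases h : nb.1 ∈ path'
    · rw [List.foldr_cons, ih, framesOf_cons_mem _ _ _ _ h]
      simp [h]
    · rw [List.foldr_cons, ih, framesOf_cons_not _ _ _ _ h]
      simp [h]

lemma runB_nil (graph : List (String × List (String × String))) (endpoint : String)
    (g : Nat) (paths : List (List String × String)) :
    runB graph endpoint g [] paths = some paths := by
  cases g <;> rfl

lemma runB_mono (graph : List (String × List (String × String))) (endpoint : String) :
    ∀ (g : Nat) (s : List (String × List String × String)) (paths r : List (List String × String)),
      runB graph endpoint g s paths = some r → runB graph endpoint (g + 1) s paths = some r := by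
  intro g
  induction g with
  | zero =>
    intro s paths r h
    cases s with
    | nil => rw [runB_nil] at h; rw [runB_nil]; exact h
    | cons fr t => simp [runB] at h
  | succ g ih =>
    intro s paths r h
    cases s with
    | nil => rw [runB_nil] at h; rw [runB_nil]; exact h
    | cons fr t =>
      obtain ⟨node, path, w⟩ := fr
      rw [runB] at h ⊢
      split at h
      · exact h
      · exact ih _ _ _ h

lemma runB_mono_le (graph : List (String × List (String × String))) (endpoint : String)
    (g g' : Nat) (hle : g ≤ g')
    (s : List (String × List String × String)) (paths r : List (List String × String))
    (h : runB graph endpoint g s paths = some r) : runB graph endpoint g' s paths = some r := by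
  induction g' with
  | zero => simpa [Nat.le_zero.mp hle] using h
  | succ g' ih =>
    rcases Nat.lt_or_ge g (g' + 1) with hlt | hge
    · exact runB_mono _ _ _ _ _ _ (ih (Nat.lt_succ_iff.mp hlt))
    · have : g = g' + 1 := Nat.le_antisymm hle hge
      simpa [this] using h

lemma revLoop_of (graph : List (String × List (String × String))) (endpoint : String) (f : Nat)
    (hM : ∀ (node : String) (path : List String) (w : String)
        (paths acc2 : List (List String × String)),
        dfsA graph endpoint f node path w paths = some acc2 →
        ∀ (rest : List (String × List String × String)) (gr : Nat)
          (res : List (List String × String)),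
          runB graph endpoint gr rest acc2 = some res →
          runB graph endpoint ((pvMaxDeg graph + 1) ^ f + gr) ((node, path, w) :: rest) paths = some res) :
    ∀ (nbrs : List (String × String)) (path' : List String) (w : String)
      (paths acc2 : List (List String × String)),
      loopA graph endpoint f nbrs path' w paths = some acc2 →
      ∀ (rest : List (String × List String × String)) (gr : Nat)
        (res : List (List String × String)),
        runB graph endpoint gr rest acc2 = some res →
        runB graph endpoint (nbrs.length * (pvMaxDeg graph + 1) ^ f + gr)
          (framesOf nbrs path' w ++ rest) paths = some res := by
  intro nbrs path' w
  induction nbrs with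
  | nil =>
    intro paths acc2 h rest gr res h2
    rw [loopA] at h
    injection h with h
    subst h
    simpa [framesOf] using h2
  | cons nb t ih =>
    intro paths acc2 h rest gr res h2
    rw [loopA] at h
    by_cases hmem : nb.1 ∈ path'
    · rw [if_pos hmem] at h
      have hrec := ih paths acc2 h rest gr res h2
      rw [framesOf_cons_mem _ _ _ _ hmem]
      refine runB_mono_le _ _ _ _ ?_ _ _ _ hrec
      simp only [List.length_cons, Nat.add_mul, Nat.one_mul]
      omega
    · rw [if_neg hmem] at h
      split at h
      · exact absurd h (by simp)
      next paths2 hd =>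
        have hrest := ih paths2 acc2 h rest gr res h2
        have hM' := hM nb.1 path' (w ++ nb.2) paths paths2 hd (framesOf t path' w ++ rest)
          (t.length * (pvMaxDeg graph + 1) ^ f + gr) res hrest
        rw [framesOf_cons_not _ _ _ _ hmem]
        rw [show (nb :: t).length * (pvMaxDeg graph + 1) ^ f + gr
            = (pvMaxDeg graph + 1) ^ f + (t.length * (pvMaxDeg graph + 1) ^ f + gr) from by
          simp only [List.length_cons, Nat.add_mul, Nat.one_mul]; omega]
        exact hM'

lemma revMain (graph : List (String × List (String × String))) (endpoint : String) :
    ∀ (f : Nat) (node : String) (path : List String) (w : String)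
      (paths acc2 : List (List String × String)),
      dfsA graph endpoint f node path w paths = some acc2 →
      ∀ (rest : List (String × List String × String)) (gr : Nat)
        (res : List (List String × String)),
        runB graph endpoint gr rest acc2 = some res →
        runB graph endpoint ((pvMaxDeg graph + 1) ^ f + gr) ((node, path, w) :: rest) paths = some res := by
  intro f
  induction f with
  | zero => intro node path w paths acc2 h; rw [dfsA] at h; simp at h
  | succ f ih =>
    intro node path w paths acc2 h rest gr res h2
    rw [dfsA] at h
    split at h
    · exact absurd h (by simp)
    next nbrs hl =>
      have hloop := revLoop_of graph endpoint f ih nbrs (path ++ [node]) w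
        (if node = endpoint then paths ++ [(path ++ [node], w)] else paths) acc2 h rest gr res h2
      have hT : 1 ≤ (pvMaxDeg graph + 1) ^ f := Nat.one_le_pow _ _ (Nat.succ_pos _)
      have hdeg : nbrs.length ≤ pvMaxDeg graph := deg_le_maxDeg _ _ _ (pvLookup_mem _ _ _ hl)
      have hmul : nbrs.length * (pvMaxDeg graph + 1) ^ f ≤ pvMaxDeg graph * (pvMaxDeg graph + 1) ^ f :=
        Nat.mul_le_mul_right _ hdeg
      have hpow : (pvMaxDeg graph + 1) ^ (f + 1)
          = pvMaxDeg graph * (pvMaxDeg graph + 1) ^ f + (pvMaxDeg graph + 1) ^ f := by ring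
      obtain ⟨k, hk⟩ : ∃ k, (pvMaxDeg graph + 1) ^ (f + 1) + gr = k + 1 :=
        ⟨(pvMaxDeg graph + 1) ^ (f + 1) + gr - 1, by omega⟩
      rw [hk, runB, hl]
      dsimp only
      rw [push_eq]
      refine runB_mono_le _ _ _ _ ?_ _ _ _ hloop
      omega

lemma nodup_subset_length (p l : List String) (hn : p.Nodup) (hs : ∀ x ∈ p, x ∈ l) :
    p.length ≤ l.length := by
  calc p.length = p.toFinset.card := (List.toFinset_card_of_nodup hn).symm
    _ ≤ l.toFinset.card := Finset.card_le_card (by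
        intro x hx
        simp only [List.mem_toFinset] at hx ⊢
        exact hs x hx)
    _ ≤ l.length := l.toFinset_card_le

lemma exLoop_of (graph : List (String × List (String × String))) (endpoint : String) (f : Nat)
    (hM : ∀ (node : String) (path : List String) (w : String) (paths : List (List String × String)),
        node ∈ graph.map Prod.fst → (path ++ [node]).Nodup →
        (∀ x ∈ path ++ [node], x ∈ graph.map Prod.fst) →
        graph.length < f + path.length →
        ∃ r, dfsA graph endpoint f node path w paths = some r) :
    ∀ (nbrs : List (String × String)) (path' : List String) (w : String),
      (∀ nb ∈ nbrs, nb.1 ∈ graph.map Prod.fst) → path'.Nodup →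
      (∀ x ∈ path', x ∈ graph.map Prod.fst) → graph.length < f + path'.length →
      ∀ (paths : List (List String × String)),
        ∃ r, loopA graph endpoint f nbrs path' w paths = some r := by
  intro nbrs path' w
  induction nbrs with
  | nil => intro _ _ _ _ paths; exact ⟨paths, by rw [loopA]⟩
  | cons nb t ih =>
    intro hkeys hnd hsub hfuel paths
    by_cases hmem : nb.1 ∈ path'
    · obtain ⟨r, hr⟩ := ih (fun x hx => hkeys x (List.mem_cons_of_mem _ hx)) hnd hsub hfuel paths
      exact ⟨r, by rw [loopA, if_pos hmem]; exact hr⟩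
    · have hnd' : (path' ++ [nb.1]).Nodup := by
        simp [List.nodup_append, hnd]
        exact fun a ha h => hmem (h ▸ ha)
      have hsub' : ∀ x ∈ path' ++ [nb.1], x ∈ graph.map Prod.fst := by
        intro x hx
        rcases List.mem_append.mp hx with hx | hx
        · exact hsub x hx
        · simp at hx; subst hx; exact hkeys nb (List.mem_cons_self ..)
      obtain ⟨paths2, hp2⟩ := hM nb.1 path' (w ++ nb.2) paths
        (hkeys nb (List.mem_cons_self ..)) hnd' hsub' hfuel
      obtain ⟨r, hr⟩ := ih (fun x hx => hkeys x (List.mem_cons_of_mem _ hx)) hnd hsub hfuel paths2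
      refine ⟨r, ?_⟩
      rw [loopA, if_neg hmem]
      split
      next heq => rw [heq] at hp2; cases hp2
      next paths2' heq =>
        rw [heq] at hp2
        injection hp2 with hp2
        subst hp2
        exact hr

lemma exMain (graph : List (String × List (String × String))) (endpoint : String)
    (hpre : ∀ e ∈ graph, ∀ nb ∈ e.2, nb.1 ∈ graph.map Prod.fst) :
    ∀ (f : Nat) (node : String) (path : List String) (w : String)
      (paths : List (List String × String)),
      node ∈ graph.map Prod.fst → (path ++ [node]).Nodup →
      (∀ x ∈ path ++ [node], x ∈ graph.map Prod.fst) →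
      graph.length < f + path.length →
      ∃ r, dfsA graph endpoint f node path w paths = some r := by
  intro f
  induction f with
  | zero =>
    intro node path w paths hkey hnd hsub hfuel
    exfalso
    have hlen : (path ++ [node]).length ≤ (graph.map Prod.fst).length :=
      nodup_subset_length _ _ hnd hsub
    simp at hlen
    omega
  | succ f ih =>
    intro node path w paths hkey hnd hsub hfuel
    obtain ⟨nbrs, hl⟩ := pvLookup_exists graph node hkey
    have hkeys : ∀ nb ∈ nbrs, nb.1 ∈ graph.map Prod.fst :=
      fun nb hnb => hpre (node, nbrs) (pvLookup_mem _ _ _ hl) nb hnb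
    have hfuel' : graph.length < f + (path ++ [node]).length := by simp; omega
    obtain ⟨r, hr⟩ := exLoop_of graph endpoint f ih nbrs (path ++ [node]) w hkeys hnd hsub hfuel'
      (if node = endpoint then paths ++ [(path ++ [node], w)] else paths)
    refine ⟨r, ?_⟩
    rw [dfsA]
    split
    next heq => rw [hl] at heq; cases heq
    next nbrs' heq =>
      rw [hl] at heq
      injection heq with heq
      subst heq
      exact hr

-- ===== VERDICT (by name: the statement is the Claim_ definition above) =====
theorem find_paths_to_endpoint_spec : Claim_equal_find_paths_to_endpoint := by
  intro graph start endpoint _ hpre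
  unfold Spec_find_paths_to_endpoint
  obtain ⟨r, hA⟩ := exMain graph endpoint hpre.2 (graph.length + 2) start [] "" []
    hpre.1 (by simp) (by simpa using hpre.1) (by omega)
  have hB := revMain graph endpoint (graph.length + 2) start [] "" [] r hA [] 0 r
    (runB_nil _ _ _ _)
  have hB' := runB_mono_le graph endpoint _ ((pvMaxDeg graph + 1) ^ (graph.length + 2) + 1)
    (by omega) _ _ _ hB
  unfold find_paths_to_endpoint find_paths_to_endpoint_alt
  rw [hA, hB']
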